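-- pv_equiv track=rewrite | github.com/KirillAmurskiy/algorithms | greedy/different_sum.py | get_max_k
-- ===== SOURCE A (Python) =====
-- def get_max_k(n):
--     cur_sum = 0
--     k = 0
--     sums = []
--     for i in range(1, n + 1):
--         k += 1
--         if cur_sum + i + (i + 1) > n:
--             sums.append(n - cur_sum)
--             cur_sum += n - cur_sum
--             break
--         else:
--             sums.append(i)
--             cur_sum += i
--     return k, sums
-- ===== SOURCE B (Python) =====
-- import math
--
-- def get_max_k(n):
--     if n <= 0:
--         return 0, []
--     t = (math.isqrt(8 * n + 1) - 1) // 2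
--     return t, list(range(1, t)) + [n - t * (t - 1) // 2]
-- ===== Notes on version B (the rewrite author's own statement) =====
-- stated objective: simpler
-- what changed: Replaces A's greedy accumulation loop (one iteration per summand, with an in-loop break condition) with a closed-form computation: the count t comes from the quadratic formula via math.isqrt and the result list is built directly as range(1, t) plus the remainder.
import Mathlib
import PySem

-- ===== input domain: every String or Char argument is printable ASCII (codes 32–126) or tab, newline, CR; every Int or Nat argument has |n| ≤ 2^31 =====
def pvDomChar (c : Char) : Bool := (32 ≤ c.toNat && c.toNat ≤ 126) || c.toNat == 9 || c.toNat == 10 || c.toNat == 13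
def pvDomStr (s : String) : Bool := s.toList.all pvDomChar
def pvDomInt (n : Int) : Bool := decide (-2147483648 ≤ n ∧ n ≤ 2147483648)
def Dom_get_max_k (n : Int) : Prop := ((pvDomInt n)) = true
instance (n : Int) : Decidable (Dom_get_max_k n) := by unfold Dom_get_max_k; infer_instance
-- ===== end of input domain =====

-- B replaces A's greedy accumulation loop by a closed-form count via integer square root
-- plus direct construction of the list (objective: simpler).

-- ===== PORT A =====
-- the for-loop with break, over the remaining range values; state (cur_sum, k, sums)
def getMaxKLoop (n : Int) : List Int → Int → Int → List Int → Int × List Int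
  | [], _, k, sums => (k, sums)
  | i :: rest, cur, k, sums =>
    if cur + i + (i + 1) > n then (k + 1, sums ++ [n - cur])
    else getMaxKLoop n rest (cur + i) (k + 1) (sums ++ [i])

def get_max_k (n : Int) : Int × List Int :=
  getMaxKLoop n (PySem.List.pyRange 1 (n + 1) 1) 0 0 []

-- ===== PORT B =====
-- math.isqrt on a nonnegative int is Nat.sqrt (exact integer square root)
def get_max_k_alt (n : Int) : Int × List Int :=
  if n ≤ 0 then (0, [])
  else
    let t : Int := PySem.Int.floordiv ((Nat.sqrt (8 * n + 1).toNat : Int) - 1) 2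
    (t, PySem.List.pyRange 1 t 1 ++ [n - PySem.Int.floordiv (t * (t - 1)) 2])

-- ===== PRECONDITION & SPEC =====
def Spec_get_max_k (n : Int) (out : Int × List Int) : Prop := out = get_max_k_alt n
instance (n : Int) (out : Int × List Int) : Decidable (Spec_get_max_k n out) := by unfold Spec_get_max_k; infer_instance

-- ===== CLAIM (what is proved, stated in full; the proofs are below) =====
def Claim_equal_get_max_k : Prop := ∀ (n : Int), Dom_get_max_k n → Spec_get_max_k n (get_max_k n)

-- ===== LEMMAS AND PROOFS =====

-- Loop invariant: entering the loop at value j with cur = j(j-1)/2, k = j-1, sums = [1..j-1],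
-- where t is the largest count with t(t+1)/2 ≤ n, the loop returns (t, [1..t-1] ++ [n - t(t-1)/2]).
lemma loop_run (n t : Int) (h1 : t * (t + 1) ≤ 2 * n) (h2 : 2 * n < (t + 1) * (t + 2)) :
    ∀ (m : Nat) (j cur : Int), j = t - m → 1 ≤ j → 2 * cur = j * (j - 1) →
    getMaxKLoop n (PySem.List.pyRange j (n + 1) 1) cur (j - 1) (PySem.List.pyRange 1 j 1)
      = (t, PySem.List.pyRange 1 t 1 ++ [n - t * (t - 1) / 2]) := by
  intro m
  induction m with
  | zero =>
    intro j cur hj hj1 hcur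
    have hjt : j = t := by omega
    subst hjt
    have hjn : j ≤ n := by nlinarith
    rw [PySem.List.pyRange_one_cons (by omega : j < n + 1)]
    unfold getMaxKLoop
    have hcond : cur + j + (j + 1) > n := by nlinarith
    rw [if_pos hcond]
    have hdiv : j * (j - 1) / 2 = cur := by
      rw [← hcur]; exact Int.mul_ediv_cancel_left _ (by norm_num)
    rw [hdiv]
    have hk : j - 1 + 1 = j := by omega
    rw [hk]
  | succ m ih =>
    intro j cur hj hj1 hcur
    have hjt : j < t := by omega
    have hjn : j ≤ n := by nlinarith
    rw [PySem.List.pyRange_one_cons (by omega : j < n + 1)]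
    unfold getMaxKLoop
    have hcond : ¬ (cur + j + (j + 1) > n) := by nlinarith
    rw [if_neg hcond]
    have hsums : PySem.List.pyRange 1 j 1 ++ [j] = PySem.List.pyRange 1 (j + 1) 1 :=
      (PySem.List.pyRange_one_succ_right hj1).symm
    rw [hsums]
    have := ih (j + 1) (cur + j) (by omega) (by omega) (by linear_combination hcur)
    have hk : j - 1 + 1 = (j + 1) - 1 := by omega
    rw [hk]
    exact this

-- ===== VERDICT (by name: the statement is the Claim_ definition above) =====
theorem get_max_k_spec : Claim_equal_get_max_k := by
  intro n _
  unfold Spec_get_max_k get_max_k get_max_k_alt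
  by_cases hn : n ≤ 0
  · rw [if_pos hn, PySem.List.pyRange_one_eq_nil (by omega : n + 1 ≤ 1)]
    rfl
  · rw [if_neg hn]
    replace hn : 0 < n := by omega
    simp only [PySem.Int.floordiv_eq_ediv_of_pos (show (0:Int) < 2 by norm_num)]
    set s : Nat := Nat.sqrt (8 * n + 1).toNat with hs
    have hcast : ((8 * n + 1).toNat : Int) = 8 * n + 1 := by omega
    have hlow : (s : Int) * s ≤ 8 * n + 1 := by
      have h := Nat.sqrt_le' (8 * n + 1).toNat
      have h' : ((s ^ 2 : Nat) : Int) ≤ ((8 * n + 1).toNat : Int) := by exact_mod_cast h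
      rw [hcast] at h'; push_cast at h'; nlinarith [h']
    have hhigh : 8 * n + 1 < ((s : Int) + 1) * ((s : Int) + 1) := by
      have h := Nat.lt_succ_sqrt' (8 * n + 1).toNat
      have h' : ((8 * n + 1).toNat : Int) < (((s + 1) ^ 2 : Nat) : Int) := by exact_mod_cast h
      rw [hcast] at h'; push_cast at h'; nlinarith [h']
    have hs3 : 3 ≤ (s : Int) := by
      have h9 : (3 : Nat) ^ 2 ≤ (8 * n + 1).toNat := by simp; omega
      have := (Nat.le_sqrt').mpr h9
      exact_mod_cast this
    set t : Int := ((s : Int) - 1) / 2 with ht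
    have hts : 2 * t + 1 ≤ (s : Int) ∧ (s : Int) ≤ 2 * t + 2 := by omega
    have ht1 : 1 ≤ t := by omega
    have h1 : t * (t + 1) ≤ 2 * n := by nlinarith [hts.1, hlow, ht1]
    have h2 : 2 * n < (t + 1) * (t + 2) := by nlinarith [hts.2, hhigh, ht1]
    have hrun := loop_run n t h1 h2 (t - 1).toNat 1 0 (by omega) (by omega) (by ring)
    rw [PySem.List.pyRange_one_eq_nil (le_refl 1)] at hrun
    have h11 : (1 : Int) - 1 = 0 := by norm_num
    rw [h11] at hrun
    exact hrun
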